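-- pv_equiv track=rewrite | github.com/kyowon1108/Sori | backend/app/services/agents/workers/health_worker.py | _calculate_severity
-- ===== SOURCE A (Python) =====
-- from typing import Dict, List, Optional, Tuple
--
-- def _calculate_severity(
--
--     symptoms: List[Tuple[str, str]],
--     is_emergency: bool
-- ) -> str:
--     """Calculate overall severity from detected symptoms."""
--     if is_emergency:
--         return "emergency"
--
--     if not symptoms:
--         return "none"
--
--     severity_order = ["emergency", "urgent", "high", "moderate", "low"]
--
--     for severity in severity_order:
--         if any(s[1] == severity for s in symptoms):
--             return severity
--
--     return "low"
-- ===== SOURCE B (Python) =====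
-- from typing import Dict, List, Optional, Tuple
--
-- def _calculate_severity(
--     symptoms: List[Tuple[str, str]],
--     is_emergency: bool
-- ) -> str:
--     if is_emergency:
--         return "emergency"
--     if not symptoms:
--         return "none"
--     severity_order = ["emergency", "urgent", "high", "moderate", "low"]
--     rank = {name: i for i, name in enumerate(severity_order)}
--     best = len(severity_order)
--     for s in symptoms:
--         i = rank.get(s[1])
--         if i is not None and i < best:
--             best = i
--     return severity_order[best] if best < len(severity_order) else "low"
-- ===== Notes on version B (the rewrite author's own statement) =====
-- stated objective: alternative
-- what changed: Replaced the nested scan (for each of the 5 severity levels, scan all symptoms) by a rank table and one single minimum-tracking pass over the symptoms.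
import Mathlib
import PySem

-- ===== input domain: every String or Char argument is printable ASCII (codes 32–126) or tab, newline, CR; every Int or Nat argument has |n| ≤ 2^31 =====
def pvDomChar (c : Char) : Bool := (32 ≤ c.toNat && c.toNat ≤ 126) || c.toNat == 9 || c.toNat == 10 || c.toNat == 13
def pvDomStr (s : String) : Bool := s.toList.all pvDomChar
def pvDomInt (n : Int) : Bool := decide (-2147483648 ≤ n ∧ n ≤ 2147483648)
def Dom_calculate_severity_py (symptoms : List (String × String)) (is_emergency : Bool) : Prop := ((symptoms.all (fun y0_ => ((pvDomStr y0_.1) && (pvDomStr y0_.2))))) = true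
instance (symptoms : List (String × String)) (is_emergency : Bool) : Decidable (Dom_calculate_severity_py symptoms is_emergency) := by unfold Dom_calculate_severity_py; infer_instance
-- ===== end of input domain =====

-- B replaces A's nested scan (per severity level, scan all symptoms) by a rank table and a
-- single minimum-tracking pass over the symptoms (objective: alternative; no measured speedup).

-- ===== PORT A =====
def calculate_severity_py (symptoms : List (String × String)) (is_emergency : Bool) : String :=
  if is_emergency then "emergency"
  else if symptoms = [] then "none"
  else
    let severity_order : List String := ["emergency", "urgent", "high", "moderate", "low"]
    -- the for-loop returning the first severity any symptom matches is List.find?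
    match severity_order.find? (fun severity => symptoms.any (fun s => s.2 == severity)) with
    | some severity => severity
    | none => "low"

-- ===== PORT B =====
def calculate_severity_py_alt (symptoms : List (String × String)) (is_emergency : Bool) : String :=
  if is_emergency then "emergency"
  else if symptoms = [] then "none"
  else
    let severity_order : List String := ["emergency", "urgent", "high", "moderate", "low"]
    let rank : PySem.Dict String Int :=
      PySem.Dict.ofList ((PySem.List.enumerate severity_order 0).map (fun p => (p.2, p.1)))
    let best : Int := symptoms.foldl (fun best s =>
      match rank.get? s.2 with
      | some i => if i < best then i else best
      | none => best) (severity_order.length : Int)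
    if best < (severity_order.length : Int) then PySem.List.pyGetD severity_order best "low"
    else "low"

-- ===== PRECONDITION & SPEC =====
def Spec_calculate_severity_py (symptoms : List (String × String)) (is_emergency : Bool) (out : String) : Prop := out = calculate_severity_py_alt symptoms is_emergency
instance (symptoms : List (String × String)) (is_emergency : Bool) (out : String) : Decidable (Spec_calculate_severity_py symptoms is_emergency out) := by unfold Spec_calculate_severity_py; infer_instance

-- ===== CLAIM (what is proved, stated in full; the proofs are below) =====
def Claim_equal_calculate_severity_py : Prop := ∀ (symptoms : List (String × String)) (is_emergency : Bool), Dom_calculate_severity_py symptoms is_emergency → Spec_calculate_severity_py symptoms is_emergency (calculate_severity_py symptoms is_emergency)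

-- ===== LEMMAS AND PROOFS =====

-- rank of a severity name (5 = not in the table)
def pvRk (x : String) : Int :=
  if x = "emergency" then 0 else if x = "urgent" then 1 else if x = "high" then 2
  else if x = "moderate" then 3 else if x = "low" then 4 else 5

def pvMfold (l : List (String × String)) (b : Int) : Int :=
  l.foldl (fun b s => if pvRk s.2 < b then pvRk s.2 else b) b

theorem pvRk_nonneg (x : String) : 0 ≤ pvRk x := by
  unfold pvRk; split_ifs <;> omega

theorem pvRk_le (x : String) : pvRk x ≤ 5 := by
  unfold pvRk; split_ifs <;> omega

theorem pvRank_get? (x : String) :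
    (PySem.Dict.ofList ((PySem.List.enumerate
        (["emergency", "urgent", "high", "moderate", "low"] : List String) 0).map
        (fun p => (p.2, p.1)))).get? x =
      (if x = "emergency" then some 0 else if x = "urgent" then some 1 else if x = "high" then some 2
       else if x = "moderate" then some 3 else if x = "low" then some 4 else none) := by
  have h : (PySem.Dict.ofList ((PySem.List.enumerate
        (["emergency", "urgent", "high", "moderate", "low"] : List String) 0).map
        (fun p => (p.2, p.1)))) = PySem.Dict.mk [("emergency",0),("urgent",1),("high",2),("moderate",3),("low",4)] := by decide
  rw [h]
  simp only [PySem.Dict.get?_mk_cons, beq_iff_eq]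
  simp only [@eq_comm String x]
  rfl

theorem pvStep_eq (b : Int) (hb : b ≤ 5) (x : String) :
    (match (PySem.Dict.ofList ((PySem.List.enumerate
        (["emergency", "urgent", "high", "moderate", "low"] : List String) 0).map
        (fun p => (p.2, p.1)))).get? x with
      | some i => if i < b then i else b
      | none => b) = if pvRk x < b then pvRk x else b := by
  rw [pvRank_get?]
  unfold pvRk
  split_ifs <;> simp_all <;> omega

theorem pvFold_eq_mfold (l : List (String × String)) (b : Int) (hb : b ≤ 5) :
    l.foldl (fun best s =>
      match (PySem.Dict.ofList ((PySem.List.enumerate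
          (["emergency", "urgent", "high", "moderate", "low"] : List String) 0).map
          (fun p => (p.2, p.1)))).get? s.2 with
      | some i => if i < best then i else best
      | none => best) b = pvMfold l b := by
  induction l generalizing b with
  | nil => rfl
  | cons s l ih =>
    simp only [List.foldl_cons, pvMfold] at *
    rw [pvStep_eq b hb s.2]
    exact ih _ (by have := pvRk_le s.2; split_ifs <;> omega)

theorem pvMfold_le_init (l : List (String × String)) (b : Int) : pvMfold l b ≤ b := by
  induction l generalizing b with
  | nil => simp [pvMfold]
  | cons s l ih =>
    simp only [pvMfold, List.foldl_cons] at *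
    have := ih (if pvRk s.2 < b then pvRk s.2 else b)
    split_ifs at this ⊢ <;> omega

theorem pvMfold_nonneg (l : List (String × String)) (b : Int) (hb : 0 ≤ b) : 0 ≤ pvMfold l b := by
  induction l generalizing b with
  | nil => simpa [pvMfold] using hb
  | cons s l ih =>
    simp only [pvMfold, List.foldl_cons] at *
    have h := pvRk_nonneg s.2
    exact ih _ (by split_ifs <;> omega)

theorem pvMfold_le_mem (l : List (String × String)) (b : Int) (s : String × String)
    (hs : s ∈ l) : pvMfold l b ≤ pvRk s.2 := by
  induction l generalizing b with
  | nil => cases hs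
  | cons t l ih =>
    simp only [pvMfold, List.foldl_cons] at *
    rcases List.mem_cons.mp hs with h | h
    · subst h
      have h1 := pvMfold_le_init l (pvRk s.2)
      have h2 := pvMfold_le_init l b
      simp only [pvMfold] at h1 h2
      split_ifs with hc
      · exact h1
      · omega
    · exact ih _ h

theorem pvMfold_attained (l : List (String × String)) (b : Int) :
    pvMfold l b = b ∨ ∃ s ∈ l, pvMfold l b = pvRk s.2 := by
  induction l generalizing b with
  | nil => left; rfl
  | cons t l ih =>
    simp only [pvMfold, List.foldl_cons] at *
    by_cases hc : pvRk t.2 < b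
    · simp only [if_pos hc]
      rcases ih (pvRk t.2) with h | ⟨s, hs, h⟩
      · right; exact ⟨t, List.mem_cons_self, h⟩
      · right; exact ⟨s, List.mem_cons_of_mem _ hs, h⟩
    · simp only [if_neg hc]
      rcases ih b with h | ⟨s, hs, h⟩
      · left; exact h
      · right; exact ⟨s, List.mem_cons_of_mem _ hs, h⟩

theorem pvRk_eq_name (x : String) :
    (pvRk x = 0 → x = "emergency") ∧ (pvRk x = 1 → x = "urgent") ∧ (pvRk x = 2 → x = "high") ∧
    (pvRk x = 3 → x = "moderate") ∧ (pvRk x = 4 → x = "low") := by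
  unfold pvRk
  split_ifs <;> refine ⟨?_, ?_, ?_, ?_, ?_⟩ <;> intro h <;> first | assumption | omega

-- ===== VERDICT (by name: the statement is the Claim_ definition above) =====
theorem calculate_severity_py_spec : Claim_equal_calculate_severity_py := by
  intro symptoms is_emergency _
  unfold Spec_calculate_severity_py calculate_severity_py calculate_severity_py_alt
  cases is_emergency
  case true => simp
  case false =>
  simp only [Bool.false_eq_true, if_false]
  by_cases hnil : symptoms = []
  · simp [hnil]
  simp only [if_neg hnil]
  rw [show ((["emergency", "urgent", "high", "moderate", "low"] : List String).length : Int) = 5 from rfl]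
  rw [pvFold_eq_mfold symptoms 5 (by omega)]
  have h0 : 0 ≤ pvMfold symptoms 5 := pvMfold_nonneg _ _ (by omega)
  have h5 : pvMfold symptoms 5 ≤ 5 := pvMfold_le_init _ _
  have hatt := pvMfold_attained symptoms 5
  have hmem := fun s hs => pvMfold_le_mem symptoms 5 s hs
  set m := pvMfold symptoms 5 with hm
  have hanyF : ∀ (name : String), pvRk name < m →
      symptoms.any (fun s => s.2 == name) = false := by
    intro name hlt
    rw [List.any_eq_false]
    intro s hs
    simp only [beq_iff_eq]
    intro heq
    have := hmem s hs
    rw [heq] at this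
    omega
  interval_cases m
  · -- m = 0
    rcases hatt with h | ⟨s, hs, h⟩
    · omega
    · have hx : s.2 = "emergency" := (pvRk_eq_name s.2).1 h.symm
      have h1 : symptoms.any (fun s => s.2 == "emergency") = true :=
        List.any_eq_true.mpr ⟨s, hs, by simp [hx]⟩
      simp [List.find?_cons, h1] <;> decide
  · rcases hatt with h | ⟨s, hs, h⟩
    · omega
    · have hx : s.2 = "urgent" := (pvRk_eq_name s.2).2.1 h.symm
      have h1 : symptoms.any (fun s => s.2 == "urgent") = true :=
        List.any_eq_true.mpr ⟨s, hs, by simp [hx]⟩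
      have f0 := hanyF "emergency" (by decide)
      simp [List.find?_cons, f0, h1] <;> decide
  · rcases hatt with h | ⟨s, hs, h⟩
    · omega
    · have hx : s.2 = "high" := (pvRk_eq_name s.2).2.2.1 h.symm
      have h1 : symptoms.any (fun s => s.2 == "high") = true :=
        List.any_eq_true.mpr ⟨s, hs, by simp [hx]⟩
      have f0 := hanyF "emergency" (by decide)
      have f1 := hanyF "urgent" (by decide)
      simp [List.find?_cons, f0, f1, h1] <;> decide
  · rcases hatt with h | ⟨s, hs, h⟩
    · omega
    · have hx : s.2 = "moderate" := (pvRk_eq_name s.2).2.2.2.1 h.symm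
      have h1 : symptoms.any (fun s => s.2 == "moderate") = true :=
        List.any_eq_true.mpr ⟨s, hs, by simp [hx]⟩
      have f0 := hanyF "emergency" (by decide)
      have f1 := hanyF "urgent" (by decide)
      have f2 := hanyF "high" (by decide)
      simp [List.find?_cons, f0, f1, f2, h1] <;> decide
  · rcases hatt with h | ⟨s, hs, h⟩
    · omega
    · have hx : s.2 = "low" := (pvRk_eq_name s.2).2.2.2.2 h.symm
      have h1 : symptoms.any (fun s => s.2 == "low") = true :=
        List.any_eq_true.mpr ⟨s, hs, by simp [hx]⟩
      have f0 := hanyF "emergency" (by decide)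
      have f1 := hanyF "urgent" (by decide)
      have f2 := hanyF "high" (by decide)
      have f3 := hanyF "moderate" (by decide)
      simp [List.find?_cons, f0, f1, f2, f3, h1] <;> decide
  · -- m = 5 : no symptom matches any severity name
    have f0 := hanyF "emergency" (by decide)
    have f1 := hanyF "urgent" (by decide)
    have f2 := hanyF "high" (by decide)
    have f3 := hanyF "moderate" (by decide)
    have f4 := hanyF "low" (by decide)
    simp [List.find?_cons, f0, f1, f2, f3, f4]
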